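-- pv_equiv track=rewrite | github.com/AlexAuss/AI-Code-Reviewer | UI/codeReviewerGUIv4.py | build_patch_from_texts
-- ===== SOURCE A (Python) =====
-- def build_patch_from_texts(before_text: str, after_text: str, context_lines: int = 3) -> str:
--     """Build a patch from before/after textareas with surrounding context.
--
--     Strategy:
--     1. Extract marked lines (- and +) from before/after.
--     2. For each marked line, include K surrounding context lines.
--     3. Output the hunks in order with minimal duplication.
--     """
--     b_lines = before_text.splitlines()
--     a_lines = after_text.splitlines()
--
--     # Find all marked line indices
--     b_marked_indices = set()
--     a_marked_indices = set()
--
--     for idx, line in enumerate(b_lines):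
--         if line.lstrip().startswith('-'):
--             b_marked_indices.add(idx)
--
--     for idx, line in enumerate(a_lines):
--         if line.lstrip().startswith('+'):
--             a_marked_indices.add(idx)
--
--     if not b_marked_indices and not a_marked_indices:
--         # No marked lines; return empty or full text (choose based on preference)
--         return ""
--
--     # Collect all line indices to include (marked + context)
--     included_b = set()
--     included_a = set()
--
--     # For each marked line in before, include it plus context
--     for idx in b_marked_indices:
--         for j in range(max(0, idx - context_lines), min(len(b_lines), idx + context_lines + 1)):
--             included_b.add(j)
--
--     # For each marked line in after, include it plus context
--     for idx in a_marked_indices: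
--         for j in range(max(0, idx - context_lines), min(len(a_lines), idx + context_lines + 1)):
--             included_a.add(j)
--
--     out = []
--     last_output_idx = -10  # Track last output index to avoid duplication
--
--     # Iterate through before text and output included lines
--     for idx in sorted(included_b):
--         line = b_lines[idx]
--         s = line.lstrip()
--
--         if s.startswith('-'):
--             # Marked removal line
--             content = s[1:].lstrip() if s[1:].startswith(' ') else s[1:]
--             out.append('-' + content)
--         else:
--             # Context line from before
--             out.append(line)
--
--         last_output_idx = idx
--
--     # Iterate through after text and output marked added lines (with minimal context duplication)
--     for idx in sorted(included_a):
--         line = a_lines[idx]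
--         s = line.lstrip()
--
--         if s.startswith('+'):
--             # Marked addition line
--             content = s[1:].lstrip() if s[1:].startswith(' ') else s[1:]
--             out.append('+' + content)
--
--     return "\n".join(out)
-- ===== SOURCE B (Python) =====
-- def build_patch_from_texts(before_text: str, after_text: str, context_lines: int = 3) -> str:
--     """Single-pass rewrite: instead of materializing and sorting an index set,
--     scan each side once and keep a line iff some marked index is within
--     context_lines of it."""
--     b_lines = before_text.splitlines()
--     a_lines = after_text.splitlines()
--
--     b_marked = [i for i, l in enumerate(b_lines) if l.lstrip().startswith('-')]
--     a_marked = [i for i, l in enumerate(a_lines) if l.lstrip().startswith('+')]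
--
--     if not b_marked and not a_marked:
--         return ""
--
--     def near(i, marked):
--         return any(m - context_lines <= i <= m + context_lines for m in marked)
--
--     out = []
--     for i, line in enumerate(b_lines):
--         if near(i, b_marked):
--             s = line.lstrip()
--             if s.startswith('-'):
--                 rest = s[1:]
--                 out.append('-' + (rest.lstrip() if rest.startswith(' ') else rest))
--             else:
--                 out.append(line)
--     for i, line in enumerate(a_lines):
--         if near(i, a_marked):
--             s = line.lstrip()
--             if s.startswith('+'):
--                 rest = s[1:]
--                 out.append('+' + (rest.lstrip() if rest.startswith(' ') else rest))
--     return "\n".join(out)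
-- ===== Notes on version B (the rewrite author's own statement) =====
-- stated objective: simpler
-- what changed: B drops A's index-set expansion and sort: it collects the marked indices per side once and makes a single in-order pass over each side's lines, keeping a line iff some marked index is within context_lines of it.
import Mathlib
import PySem

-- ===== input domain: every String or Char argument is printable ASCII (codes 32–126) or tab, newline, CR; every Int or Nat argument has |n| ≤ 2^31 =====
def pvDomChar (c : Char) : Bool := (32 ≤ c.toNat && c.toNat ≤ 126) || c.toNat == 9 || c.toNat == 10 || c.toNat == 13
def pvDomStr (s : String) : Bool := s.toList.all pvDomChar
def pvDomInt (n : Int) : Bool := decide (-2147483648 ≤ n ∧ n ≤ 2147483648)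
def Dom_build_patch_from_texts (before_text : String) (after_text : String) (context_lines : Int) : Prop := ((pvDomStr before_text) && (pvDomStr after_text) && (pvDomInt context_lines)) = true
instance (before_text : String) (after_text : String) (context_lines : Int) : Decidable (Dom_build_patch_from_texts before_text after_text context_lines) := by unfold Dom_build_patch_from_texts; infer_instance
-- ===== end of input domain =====

-- B replaces A's "expand marked indices into a set, then sort it" by a single in-order
-- pass per side that keeps a line iff some marked index is within context_lines of it
-- (objective: simpler — no sets, no sort, same output).

-- ===== PORT A =====
def build_patch_from_texts (before_text : String) (after_text : String) (context_lines : Int) : String :=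
  let b_lines := PySem.Str.splitlines before_text
  let a_lines := PySem.Str.splitlines after_text
  let b_marked_indices : PySem.Set Int :=
    (PySem.List.enumerate b_lines 0).foldl
      (fun s p => if PySem.Str.startswith (PySem.Str.lstrip p.2) "-" then PySem.Set.add s p.1 else s)
      PySem.Set.empty
  let a_marked_indices : PySem.Set Int :=
    (PySem.List.enumerate a_lines 0).foldl
      (fun s p => if PySem.Str.startswith (PySem.Str.lstrip p.2) "+" then PySem.Set.add s p.1 else s)
      PySem.Set.empty
  if b_marked_indices = [] ∧ a_marked_indices = [] then ""
  else
    let included_b : PySem.Set Int :=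
      b_marked_indices.foldl
        (fun s idx =>
          (PySem.List.pyRange (max 0 (idx - context_lines)) (min (b_lines.length : Int) (idx + context_lines + 1)) 1).foldl
            (fun s j => PySem.Set.add s j) s)
        PySem.Set.empty
    let included_a : PySem.Set Int :=
      a_marked_indices.foldl
        (fun s idx =>
          (PySem.List.pyRange (max 0 (idx - context_lines)) (min (a_lines.length : Int) (idx + context_lines + 1)) 1).foldl
            (fun s j => PySem.Set.add s j) s)
        PySem.Set.empty
    -- first loop carries (out, last_output_idx); last_output_idx is written but never read
    let st1 : List String × Int :=
      (PySem.List.sorted included_b (fun x => x) false).foldl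
        (fun (st : List String × Int) idx =>
          (let line := PySem.List.pyGetD b_lines idx ""
           let s := PySem.Str.lstrip line
           if PySem.Str.startswith s "-" then
             let rest := PySem.Str.slice s (some 1) none
             let content := if PySem.Str.startswith rest " " then PySem.Str.lstrip rest else rest
             st.1 ++ ["-" ++ content]
           else st.1 ++ [line],
           idx))
        ([], -10)
    let out2 : List String :=
      (PySem.List.sorted included_a (fun x => x) false).foldl
        (fun out idx =>
          let line := PySem.List.pyGetD a_lines idx ""
          let s := PySem.Str.lstrip line
          if PySem.Str.startswith s "+" then
            let rest := PySem.Str.slice s (some 1) none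
            let content := if PySem.Str.startswith rest " " then PySem.Str.lstrip rest else rest
            out ++ ["+" ++ content]
          else out)
        st1.1
    PySem.Str.join "\n" out2

-- ===== PORT B =====
-- [i for i, l in enumerate(lines) if l.lstrip().startswith(mk)]
def bpfMarked (lines : List String) (mk : String) : List Int :=
  ((PySem.List.enumerate lines 0).filter (fun p => PySem.Str.startswith (PySem.Str.lstrip p.2) mk)).map (·.1)

-- any(m - context_lines <= i <= m + context_lines for m in marked)
def bpfNear (i : Int) (marked : List Int) (c : Int) : Bool :=
  marked.any (fun m => decide (m - c ≤ i) && decide (i ≤ m + c))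

def build_patch_from_texts_alt (before_text : String) (after_text : String) (context_lines : Int) : String :=
  let b_lines := PySem.Str.splitlines before_text
  let a_lines := PySem.Str.splitlines after_text
  let b_marked : List Int := bpfMarked b_lines "-"
  let a_marked : List Int := bpfMarked a_lines "+"
  if b_marked = [] ∧ a_marked = [] then ""
  else
    let out1 : List String :=
      (PySem.List.enumerate b_lines 0).foldl
        (fun out p =>
          if bpfNear p.1 b_marked context_lines then
            let s := PySem.Str.lstrip p.2
            if PySem.Str.startswith s "-" then
              let rest := PySem.Str.slice s (some 1) none
              out ++ ["-" ++ (if PySem.Str.startswith rest " " then PySem.Str.lstrip rest else rest)]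
            else out ++ [p.2]
          else out)
        []
    let out2 : List String :=
      (PySem.List.enumerate a_lines 0).foldl
        (fun out p =>
          if bpfNear p.1 a_marked context_lines then
            let s := PySem.Str.lstrip p.2
            if PySem.Str.startswith s "+" then
              let rest := PySem.Str.slice s (some 1) none
              out ++ ["+" ++ (if PySem.Str.startswith rest " " then PySem.Str.lstrip rest else rest)]
            else out
          else out)
        out1
    PySem.Str.join "\n" out2

-- ===== PRECONDITION & SPEC =====
def Spec_build_patch_from_texts (before_text : String) (after_text : String) (context_lines : Int) (out : String) : Prop := out = build_patch_from_texts_alt before_text after_text context_lines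
instance (before_text : String) (after_text : String) (context_lines : Int) (out : String) : Decidable (Spec_build_patch_from_texts before_text after_text context_lines out) := by unfold Spec_build_patch_from_texts; infer_instance

-- ===== CLAIM (what is proved, stated in full; the proofs are below) =====
def Claim_equal_build_patch_from_texts : Prop := ∀ (before_text : String) (after_text : String) (context_lines : Int), Dom_build_patch_from_texts before_text after_text context_lines → Spec_build_patch_from_texts before_text after_text context_lines (build_patch_from_texts before_text after_text context_lines)

-- ===== LEMMAS AND PROOFS =====

-- A's marked-index set equals B's marked-index list (indices arrive in strictly increasing order, so every add is fresh)
lemma bpf_fold_add_fresh (q : Int × String → Bool) :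
    ∀ (l : List (Int × String)) (s : PySem.Set Int),
      (l.map (·.1)).Nodup → (∀ p ∈ l, p.1 ∉ s) →
      l.foldl (fun s p => if q p then PySem.Set.add s p.1 else s) s
        = s ++ (l.filter q).map (·.1) := by
  intro l
  induction l with
  | nil => intro s _ _; simp
  | cons p l ih =>
    intro s hnd hfresh
    simp only [List.map_cons, List.nodup_cons] at hnd
    by_cases hq : q p
    · have hadd : PySem.Set.add s p.1 = s ++ [p.1] :=
        PySem.Set.add_of_not_mem (hfresh p (by simp))
      simp only [List.foldl_cons, hq, if_pos, hadd, List.filter_cons_of_pos hq, List.map_cons]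
      rw [ih (s ++ [p.1]) hnd.2]
      · simp
      · intro r hr
        simp only [List.mem_append, List.mem_singleton]
        rintro (h | hre)
        · exact hfresh r (List.mem_cons_of_mem _ hr) h
        · exact hnd.1 (hre ▸ List.mem_map_of_mem hr)
    · rw [List.foldl_cons, if_neg hq, List.filter_cons_of_neg (by simp [hq])]
      exact ih s hnd.2 (fun r hr => hfresh r (List.mem_cons_of_mem _ hr))

lemma bpf_marked_eq (lines : List String) (mk : String) :
    (PySem.List.enumerate lines 0).foldl
      (fun s p => if PySem.Str.startswith (PySem.Str.lstrip p.2) mk then PySem.Set.add s p.1 else s)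
      PySem.Set.empty
    = bpfMarked lines mk := by
  rw [bpf_fold_add_fresh]
  · simp [bpfMarked, PySem.Set.empty]
  · rw [PySem.List.map_fst_enumerate]
    exact PySem.List.nodup_pyRange_one _ _
  · intro p _
    simp [PySem.Set.empty]

-- A's included set, abstracted over the marked list
def bpfIncluded (marked : List Int) (c n : Int) : PySem.Set Int :=
  marked.foldl
    (fun s idx =>
      (PySem.List.pyRange (max 0 (idx - c)) (min n (idx + c + 1)) 1).foldl
        (fun s j => PySem.Set.add s j) s)
    PySem.Set.empty

lemma bpf_mem_fold_included (marked : List Int) (c n : Int) :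
    ∀ (s : PySem.Set Int) (x : Int),
      x ∈ marked.foldl
        (fun s idx =>
          (PySem.List.pyRange (max 0 (idx - c)) (min n (idx + c + 1)) 1).foldl
            (fun s j => PySem.Set.add s j) s) s
      ↔ x ∈ s ∨ ∃ m ∈ marked, max 0 (m - c) ≤ x ∧ x < min n (m + c + 1) := by
  induction marked with
  | nil => simp
  | cons m marked ih =>
    intro s x
    simp only [List.foldl_cons]
    rw [ih]
    have : x ∈ (PySem.List.pyRange (max 0 (m - c)) (min n (m + c + 1)) 1).foldl
        (fun s j => PySem.Set.add s j) s ↔ x ∈ s ∨ max 0 (m - c) ≤ x ∧ x < min n (m + c + 1) := by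
      rw [PySem.Set.mem_foldl_add (f := fun (j : Int) => j)]
      simp [PySem.List.mem_pyRange_one]
    rw [this]
    constructor
    · rintro ((h | h) | ⟨m', hm', h⟩)
      · exact Or.inl h
      · exact Or.inr ⟨m, by simp, h⟩
      · exact Or.inr ⟨m', by simp [hm'], h⟩
    · rintro (h | ⟨m', hm', h⟩)
      · exact Or.inl (Or.inl h)
      · rcases List.mem_cons.mp hm' with h' | h'
        · exact Or.inl (Or.inr (h' ▸ h))
        · exact Or.inr ⟨m', h', h⟩

lemma bpf_nodup_included (marked : List Int) (c n : Int) : (bpfIncluded marked c n).Nodup := by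
  suffices h : ∀ s : PySem.Set Int, s.Nodup →
      (marked.foldl
        (fun s idx =>
          (PySem.List.pyRange (max 0 (idx - c)) (min n (idx + c + 1)) 1).foldl
            (fun s j => PySem.Set.add s j) s) s).Nodup by
    exact h PySem.Set.empty (by simp [PySem.Set.empty])
  induction marked with
  | nil => intro s hs; simpa
  | cons m marked ih =>
    intro s hs
    simp only [List.foldl_cons]
    apply ih
    have : (PySem.List.pyRange (max 0 (m - c)) (min n (m + c + 1)) 1).foldl
        (fun s j => PySem.Set.add s j) s = PySem.Set.update s _ := rfl
    rw [this]
    exact PySem.Set.nodup_update s _ hs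

-- membership in a window ↔ the distance test B makes (for indices known to lie in [0, n))
lemma bpf_sorted_included_eq (lines : List String) (marked : List Int) (c : Int) :
    PySem.List.sorted (bpfIncluded marked c (lines.length : Int)) (fun x => x) false
    = ((PySem.List.enumerate lines 0).filter (fun p => bpfNear p.1 marked c)).map (·.1) := by
  have hp2 : (((PySem.List.enumerate lines 0).filter (fun p => bpfNear p.1 marked c)).map
      (·.1)).Pairwise (· < ·) := by
    rw [List.pairwise_map]
    exact (PySem.List.pairwise_lt_enumerate lines 0).filter _
  have hnd1 : (PySem.List.sorted (bpfIncluded marked c (lines.length : Int)) (fun x => x)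
      false).Nodup :=
    ((PySem.List.sorted_perm _ _ _).nodup_iff).mpr (bpf_nodup_included marked c _)
  have hp1 : (PySem.List.sorted (bpfIncluded marked c (lines.length : Int)) (fun x => x)
      false).Pairwise (· < ·) := by
    have hle := PySem.List.sorted_pairwise (xs := bpfIncluded marked c (lines.length : Int))
      (key := fun x => x)
    exact (hle.and hnd1).imp (fun h => lt_of_le_of_ne h.1 h.2)
  have hnd2 : (((PySem.List.enumerate lines 0).filter (fun p => bpfNear p.1 marked c)).map
      (·.1)).Nodup := hp2.imp (fun h => ne_of_lt h)
  have hrhs : ∀ x : Int, x ∈ ((PySem.List.enumerate lines 0).filter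
        (fun p => bpfNear p.1 marked c)).map (·.1)
      ↔ 0 ≤ x ∧ x < (lines.length : Int) ∧ bpfNear x marked c = true := by
    intro x
    simp only [List.mem_map, List.mem_filter, PySem.List.mem_enumerate_iff]
    constructor
    · rintro ⟨p, ⟨⟨k, hk, rfl⟩, hnear⟩, rfl⟩
      refine ⟨by omega, by simp; omega, by simpa using hnear⟩
    · rintro ⟨h0, hn, hnear⟩
      have hkn : x.toNat < lines.length := by omega
      refine ⟨(x, lines[x.toNat]'hkn), ⟨⟨x.toNat, hkn, ?_⟩, by simpa using hnear⟩, rfl⟩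
      have h1 : (0 : Int) + (x.toNat : Int) = x := by omega
      simp
      omega
  have hmem : ∀ x : Int, x ∈ PySem.List.sorted (bpfIncluded marked c (lines.length : Int))
        (fun x => x) false
      ↔ x ∈ ((PySem.List.enumerate lines 0).filter (fun p => bpfNear p.1 marked c)).map (·.1) := by
    intro x
    rw [PySem.List.mem_sorted, hrhs]
    unfold bpfIncluded
    rw [bpf_mem_fold_included]
    simp only [PySem.Set.empty, List.not_mem_nil, false_or, bpfNear, List.any_eq_true,
      Bool.and_eq_true, decide_eq_true_eq]
    constructor
    · rintro ⟨m, hm, h1, h2⟩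
      exact ⟨by omega, by omega, m, hm, by omega, by omega⟩
    · rintro ⟨h0, hn, m, hm, h1, h2⟩
      exact ⟨m, hm, by omega, by omega⟩
  exact ((List.perm_ext_iff_of_nodup hnd1 hnd2).mpr hmem).eq_of_pairwise
    (fun a b _ _ h1 h2 => by omega) hp1 hp2

lemma bpf_fst_foldl {α β : Type} (l : List α) (f : List String → α → List String) (g : α → β)
    (acc : List String) (b : β) :
    (l.foldl (fun st x => (f st.1 x, g x)) (acc, b)).1 = l.foldl f acc := by
  induction l generalizing acc b with
  | nil => rfl
  | cons x l ih => simpa using ih (f acc x) (g x)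

lemma bpf_get_enum (lines : List String) :
    ∀ p ∈ PySem.List.enumerate lines 0, PySem.List.pyGetD lines p.1 "" = p.2 := by
  intro p hp
  rw [PySem.List.mem_enumerate_iff] at hp
  obtain ⟨k, hk, rfl⟩ := hp
  simp [PySem.List.pyGetD_natCast, List.getD_eq_getElem?_getD, hk]

-- A's first loop (over the sorted included-index set of the before side) = B's single pass
lemma bpf_before_eq (lines : List String) (marked : List Int) (c : Int) :
    (List.foldl
      (fun (st : List String × Int) idx =>
        (if PySem.Str.startswith (PySem.Str.lstrip (PySem.List.pyGetD lines idx "")) "-" = true then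
           st.1 ++ ["-" ++ if PySem.Str.startswith (PySem.Str.slice (PySem.Str.lstrip (PySem.List.pyGetD lines idx "")) (some 1) none) " " = true then
                 PySem.Str.lstrip (PySem.Str.slice (PySem.Str.lstrip (PySem.List.pyGetD lines idx "")) (some 1) none)
               else PySem.Str.slice (PySem.Str.lstrip (PySem.List.pyGetD lines idx "")) (some 1) none]
         else st.1 ++ [PySem.List.pyGetD lines idx ""], idx))
      (([] : List String), (-10 : Int))
      (PySem.List.sorted
        (List.foldl
          (fun s idx =>
            List.foldl (fun s j => PySem.Set.add s j) s
              (PySem.List.pyRange (max 0 (idx - c)) (min ((lines.length : Int)) (idx + c + 1)) 1))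
          PySem.Set.empty marked)
        (fun x => x) false)).1
    = List.foldl
      (fun out p =>
        if bpfNear p.1 marked c = true then
          if PySem.Str.startswith (PySem.Str.lstrip p.2) "-" = true then
            out ++ ["-" ++ if PySem.Str.startswith (PySem.Str.slice (PySem.Str.lstrip p.2) (some 1) none) " " = true then
                  PySem.Str.lstrip (PySem.Str.slice (PySem.Str.lstrip p.2) (some 1) none)
                else PySem.Str.slice (PySem.Str.lstrip p.2) (some 1) none]
          else out ++ [p.2]
        else out)
      [] (PySem.List.enumerate lines 0) := by
  rw [bpf_fst_foldl
    (f := fun out idx =>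
      if PySem.Str.startswith (PySem.Str.lstrip (PySem.List.pyGetD lines idx "")) "-" = true then
        out ++ ["-" ++ if PySem.Str.startswith (PySem.Str.slice (PySem.Str.lstrip (PySem.List.pyGetD lines idx "")) (some 1) none) " " = true then
              PySem.Str.lstrip (PySem.Str.slice (PySem.Str.lstrip (PySem.List.pyGetD lines idx "")) (some 1) none)
            else PySem.Str.slice (PySem.Str.lstrip (PySem.List.pyGetD lines idx "")) (some 1) none]
      else out ++ [PySem.List.pyGetD lines idx ""])
    (g := fun idx => idx)]
  have hs := bpf_sorted_included_eq lines marked c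
  unfold bpfIncluded at hs
  rw [hs, List.foldl_map, List.foldl_filter]
  apply PySem.List.foldl_congr_mem'
  intro p hp acc
  rw [bpf_get_enum lines p hp]

-- A's second loop (over the sorted included-index set of the after side) = B's single pass
lemma bpf_after_eq (lines : List String) (marked : List Int) (c : Int) (init : List String) :
    List.foldl
      (fun out idx =>
        if PySem.Str.startswith (PySem.Str.lstrip (PySem.List.pyGetD lines idx "")) "+" = true then
          out ++ ["+" ++ if PySem.Str.startswith (PySem.Str.slice (PySem.Str.lstrip (PySem.List.pyGetD lines idx "")) (some 1) none) " " = true then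
                PySem.Str.lstrip (PySem.Str.slice (PySem.Str.lstrip (PySem.List.pyGetD lines idx "")) (some 1) none)
              else PySem.Str.slice (PySem.Str.lstrip (PySem.List.pyGetD lines idx "")) (some 1) none]
        else out)
      init
      (PySem.List.sorted
        (List.foldl
          (fun s idx =>
            List.foldl (fun s j => PySem.Set.add s j) s
              (PySem.List.pyRange (max 0 (idx - c)) (min ((lines.length : Int)) (idx + c + 1)) 1))
          PySem.Set.empty marked)
        (fun x => x) false)
    = List.foldl
      (fun out p =>
        if bpfNear p.1 marked c = true then
          if PySem.Str.startswith (PySem.Str.lstrip p.2) "+" = true then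
            out ++ ["+" ++ if PySem.Str.startswith (PySem.Str.slice (PySem.Str.lstrip p.2) (some 1) none) " " = true then
                  PySem.Str.lstrip (PySem.Str.slice (PySem.Str.lstrip p.2) (some 1) none)
                else PySem.Str.slice (PySem.Str.lstrip p.2) (some 1) none]
          else out
        else out)
      init (PySem.List.enumerate lines 0) := by
  have hs := bpf_sorted_included_eq lines marked c
  unfold bpfIncluded at hs
  rw [hs, List.foldl_map, List.foldl_filter]
  apply PySem.List.foldl_congr_mem'
  intro p hp acc
  rw [bpf_get_enum lines p hp]

-- ===== VERDICT (by name: the statement is the Claim_ definition above) =====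
theorem build_patch_from_texts_spec : Claim_equal_build_patch_from_texts := by
  intro bt att c _
  unfold Spec_build_patch_from_texts
  unfold build_patch_from_texts build_patch_from_texts_alt
  simp only [bpf_marked_eq]
  split_ifs with h
  · rfl
  · refine congrArg (PySem.Str.join "\n") ?_
    rw [bpf_before_eq, bpf_after_eq]
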